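-- pv_equiv track=rewrite | github.com/dineshpathro90/CDR-Query-Tool | android_cdr.py | parse_call_logs
-- ===== SOURCE A (Python) =====
-- def parse_call_logs(raw_logs):
--     """Parse call logs."""
--     logs = []
--     current_record = {}
--
--     for line in raw_logs.split('\n'):
--         if 'Row:' in line:
--             if current_record:
--                 logs.append(current_record)
--             current_record = {}
--         elif '=' in line:
--             key, value = line.strip().split('=', 1)
--             current_record[key.strip()] = value.strip()
--
--     # Add the last record if it exists
--     if current_record:
--         logs.append(current_record)
--
--     return logs
-- ===== SOURCE B (Python) =====
-- def parse_call_logs(raw_logs):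
--     """Parse call logs."""
--     # Phase 1: partition the lines into groups at 'Row:' marker lines.
--     groups = []
--     current = []
--     for line in raw_logs.split('\n'):
--         if 'Row:' in line:
--             groups.append(current)
--             current = []
--         else:
--             current.append(line)
--     groups.append(current)
--     # Phase 2: build a record from each group; keep the non-empty ones.
--     logs = []
--     for group in groups:
--         record = {}
--         for line in group:
--             if '=' in line:
--                 key, value = line.strip().split('=', 1)
--                 record[key.strip()] = value.strip()
--         if record:
--             logs.append(record)
--     return logs
-- ===== Notes on version B (the rewrite author's own statement) =====
-- stated objective: alternative
-- what changed: Replaces A's single-pass incremental accumulator with a two-phase decomposition: first partition the lines into 'Row:'-delimited groups, then build one record per group and keep the non-empty ones.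
import Mathlib
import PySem

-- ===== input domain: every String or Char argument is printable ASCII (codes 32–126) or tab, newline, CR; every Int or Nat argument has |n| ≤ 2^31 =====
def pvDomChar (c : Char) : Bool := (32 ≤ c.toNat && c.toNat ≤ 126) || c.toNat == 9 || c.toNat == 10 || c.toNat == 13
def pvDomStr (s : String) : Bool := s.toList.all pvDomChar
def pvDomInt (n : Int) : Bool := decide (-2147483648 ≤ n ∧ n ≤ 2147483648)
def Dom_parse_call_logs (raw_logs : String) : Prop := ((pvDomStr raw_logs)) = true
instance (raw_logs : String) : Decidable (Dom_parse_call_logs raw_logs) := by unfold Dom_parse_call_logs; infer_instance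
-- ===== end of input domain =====

-- B re-parses by first partitioning the lines into 'Row:'-delimited groups and then building one
-- record per group (alternative decomposition, same cost); A keeps one incremental accumulator.

-- shared helper: the identical `elif '=' in line: …` parsing body both Pythons contain
def pclParseLine (d : PySem.Dict String String) (line : String) : PySem.Dict String String :=
  if PySem.Str.isIn "=" line then
    match PySem.Str.splitMax? (PySem.Str.strip line) "=" 1 with
    | some [k, v] => d.insert (PySem.Str.strip k) (PySem.Str.strip v)
    | _ => d          -- unreachable: '=' in line guarantees exactly two parts
  else d

-- ===== PORT A =====
def pclStepA (st : List (PySem.Dict String String) × PySem.Dict String String) (line : String) :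
    List (PySem.Dict String String) × PySem.Dict String String :=
  if PySem.Str.isIn "Row:" line then
    (if st.2.items.isEmpty then st.1 else st.1 ++ [st.2], PySem.Dict.empty)
  else (st.1, pclParseLine st.2 line)

-- the final `if current_record: logs.append(current_record)` and `return logs`
def pclFinishA (st : List (PySem.Dict String String) × PySem.Dict String String) :
    List (List (String × String)) :=
  (if st.2.items.isEmpty then st.1 else st.1 ++ [st.2]).map PySem.Dict.items

def parse_call_logs (raw_logs : String) : List (List (String × String)) :=
  pclFinishA (((PySem.Str.split? raw_logs "\n").getD []).foldl pclStepA ([], PySem.Dict.empty))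

-- ===== PORT B =====
def pclStepGroup (st : List (List String) × List String) (line : String) :
    List (List String) × List String :=
  if PySem.Str.isIn "Row:" line then (st.1 ++ [st.2], []) else (st.1, st.2 ++ [line])

-- the final `groups.append(current)`
def pclFinishG (st : List (List String) × List String) : List (List String) := st.1 ++ [st.2]

def pclStepOut (logs : List (List (String × String))) (group : List String) :
    List (List (String × String)) :=
  let record := group.foldl pclParseLine PySem.Dict.empty
  if record.items.isEmpty then logs else logs ++ [record.items]

def parse_call_logs_alt (raw_logs : String) : List (List (String × String)) :=
  (pclFinishG (((PySem.Str.split? raw_logs "\n").getD []).foldl pclStepGroup ([], []))).foldl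
    pclStepOut []

-- ===== PRECONDITION & SPEC =====
def Spec_parse_call_logs (raw_logs : String) (out : List (List (String × String))) : Prop := out = parse_call_logs_alt raw_logs
instance (raw_logs : String) (out : List (List (String × String))) : Decidable (Spec_parse_call_logs raw_logs out) := by unfold Spec_parse_call_logs; infer_instance

-- ===== CLAIM (what is proved, stated in full; the proofs are below) =====
def Claim_equal_parse_call_logs : Prop := ∀ (raw_logs : String), Dom_parse_call_logs raw_logs → Spec_parse_call_logs raw_logs (parse_call_logs raw_logs)

-- ===== LEMMAS AND PROOFS =====

-- emitted items of a possibly-empty record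
def pclEmit (d : PySem.Dict String String) : List (List (String × String)) :=
  if d.items.isEmpty then [] else [d.items]

-- recursive characterisation of the grouping fold
def pclG : List String → List String → List (List String)
  | cur, [] => [cur]
  | cur, l :: t =>
    if PySem.Str.isIn "Row:" l then cur :: pclG [] t else pclG (cur ++ [l]) t

-- common denominator: records emitted from `lines`, the current record being `cur`
def pclE : PySem.Dict String String → List String → List (List (String × String))
  | cur, [] => pclEmit cur
  | cur, l :: t =>
    if PySem.Str.isIn "Row:" l then pclEmit cur ++ pclE PySem.Dict.empty t
    else pclE (pclParseLine cur l) t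

-- records emitted from a list of groups, the first group starting from `cur`
def pclF : PySem.Dict String String → List (List String) → List (List (String × String))
  | _, [] => []
  | cur, g :: rest => pclEmit (g.foldl pclParseLine cur) ++ pclF PySem.Dict.empty rest

theorem pclA_eq (lines : List String) : ∀ (logs : List (PySem.Dict String String))
    (cur : PySem.Dict String String),
    pclFinishA (lines.foldl pclStepA (logs, cur))
      = logs.map PySem.Dict.items ++ pclE cur lines := by
  induction lines with
  | nil =>
    intro logs cur
    simp only [List.foldl_nil, pclFinishA, pclE, pclEmit]
    split_ifs <;> simp
  | cons l t ih =>
    intro logs cur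
    cases hb : PySem.Str.isIn "Row:" l with
    | true =>
      simp only [List.foldl_cons, pclStepA, pclE, hb, if_true, ih]
      split_ifs with h2 <;> simp [pclEmit, h2]
    | false =>
      simp only [List.foldl_cons, pclStepA, pclE, hb, Bool.false_eq_true, if_false, ih]

theorem pclG_eq (lines : List String) : ∀ (acc : List (List String)) (cur : List String),
    pclFinishG (lines.foldl pclStepGroup (acc, cur)) = acc ++ pclG cur lines := by
  induction lines with
  | nil => intro acc cur; simp [pclFinishG, pclG]
  | cons l t ih =>
    intro acc cur
    cases hb : PySem.Str.isIn "Row:" l with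
    | true => simp only [List.foldl_cons, pclStepGroup, pclG, hb, if_true, ih]; simp
    | false => simp only [List.foldl_cons, pclStepGroup, pclG, hb, Bool.false_eq_true, if_false, ih]

theorem pclOut_eq (gs : List (List String)) : ∀ (out : List (List (String × String))),
    gs.foldl pclStepOut out = out ++ pclF PySem.Dict.empty gs := by
  induction gs with
  | nil => intro out; simp [pclF]
  | cons g rest ih =>
    intro out
    simp only [List.foldl_cons, pclStepOut, pclF, ih]
    split_ifs with h <;> simp [pclEmit, h]

theorem pclF_G_eq (lines : List String) : ∀ (curg : List String)
    (cur : PySem.Dict String String),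
    pclF cur (pclG curg lines) = pclE (curg.foldl pclParseLine cur) lines := by
  induction lines with
  | nil => intro curg cur; simp [pclG, pclF, pclE]
  | cons l t ih =>
    intro curg cur
    cases hb : PySem.Str.isIn "Row:" l with
    | true =>
      simp only [pclG, pclE, hb, if_true, pclF, ih]
      rfl
    | false =>
      simp only [pclG, pclE, hb, Bool.false_eq_true, if_false]
      rw [ih, List.foldl_append]
      rfl

-- ===== VERDICT (by name: the statement is the Claim_ definition above) =====
theorem parse_call_logs_spec : Claim_equal_parse_call_logs := by
  intro raw _
  unfold Spec_parse_call_logs parse_call_logs parse_call_logs_alt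
  rw [pclA_eq, pclG_eq, pclOut_eq]
  simp only [List.nil_append, List.map_nil]
  rw [pclF_G_eq]
  rfl
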